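-- pv_equiv track=rewrite | github.com/rdc501/advent-of-code | 2023/10/solution.py | get_potential_enclosed_tiles
-- ===== SOURCE A (Python) =====
-- def get_potential_enclosed_tiles(rows, route):
--     tiles = []
--     row_index = 0
--     while row_index < len(rows):
--         column_index = 0
--         new_row = ""
--         while column_index < len(rows[row_index]):
--             if (row_index, column_index) in route:
--                 new_row += rows[row_index][column_index]
--             else:
--                 new_row += "?"
--             column_index += 1
--         tiles.append(new_row)
--         row_index += 1
--
--     return tiles
-- ===== SOURCE B (Python) =====
-- def get_potential_enclosed_tiles(rows, route):
--     canvas = [["?"] * len(row) for row in rows]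
--     for r, c in route:
--         if 0 <= r < len(rows) and 0 <= c < len(rows[r]):
--             canvas[r][c] = rows[r][c]
--     return ["".join(cs) for cs in canvas]
-- ===== Notes on version B (the rewrite author's own statement) =====
-- stated objective: alternative
-- what changed: Instead of scanning every grid cell and testing membership in route per cell, B pre-fills a '?' canvas and scatters only the (in-bounds) route coordinates onto it, copying the original character there.
import Mathlib
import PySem

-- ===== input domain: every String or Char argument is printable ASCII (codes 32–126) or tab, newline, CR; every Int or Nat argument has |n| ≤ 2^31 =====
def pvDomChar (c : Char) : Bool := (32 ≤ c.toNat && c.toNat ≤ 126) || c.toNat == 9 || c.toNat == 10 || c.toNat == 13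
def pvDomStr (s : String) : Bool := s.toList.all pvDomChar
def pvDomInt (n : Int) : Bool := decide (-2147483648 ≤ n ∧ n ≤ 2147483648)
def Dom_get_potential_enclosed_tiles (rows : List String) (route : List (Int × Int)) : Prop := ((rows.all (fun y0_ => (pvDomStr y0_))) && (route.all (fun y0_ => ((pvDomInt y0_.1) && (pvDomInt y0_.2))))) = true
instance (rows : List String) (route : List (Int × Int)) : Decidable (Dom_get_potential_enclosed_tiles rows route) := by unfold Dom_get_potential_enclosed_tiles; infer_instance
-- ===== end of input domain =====

-- B replaces A's per-cell membership scan of `route` by pre-filling a '?' canvas and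
-- scattering the (in-bounds) route coordinates onto it (a different traversal; no speed claim).

-- ===== PORT A =====
-- A: for each row index, for each column index, keep the character iff (r,c) ∈ route.
def get_potential_enclosed_tiles (rows : List String) (route : List (Int × Int)) : List String :=
  (List.range rows.length).foldl (fun tiles i =>
    tiles ++ [String.mk ((List.range (rows.getD i "").toList.length).foldl (fun nr (j : Nat) =>
      nr ++ (if ((i : Int), (j : Int)) ∈ route then [(rows.getD i "").toList.getD j '?'] else ['?'])) [])]) []

-- ===== PORT B =====
-- one route coordinate scattered onto the canvas (bounds-checked, as in Source B)
def pvScatter (rows : List String) (cv : List (List Char)) (p : Int × Int) : List (List Char) :=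
  if 0 ≤ p.1 ∧ p.1 < (rows.length : Int) ∧ 0 ≤ p.2 ∧ p.2 < ((rows.getD p.1.toNat "").toList.length : Int)
  then cv.set p.1.toNat ((cv.getD p.1.toNat []).set p.2.toNat ((rows.getD p.1.toNat "").toList.getD p.2.toNat '?'))
  else cv

def get_potential_enclosed_tiles_alt (rows : List String) (route : List (Int × Int)) : List String :=
  (route.foldl (pvScatter rows) (rows.map (fun s => List.replicate s.toList.length '?'))).map String.mk

-- ===== PRECONDITION & SPEC =====
def Spec_get_potential_enclosed_tiles (rows : List String) (route : List (Int × Int)) (out : List String) : Prop := out = get_potential_enclosed_tiles_alt rows route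
instance (rows : List String) (route : List (Int × Int)) (out : List String) : Decidable (Spec_get_potential_enclosed_tiles rows route out) := by unfold Spec_get_potential_enclosed_tiles; infer_instance

-- ===== CLAIM (what is proved, stated in full; the proofs are below) =====
def Claim_equal_get_potential_enclosed_tiles : Prop := ∀ (rows : List String) (route : List (Int × Int)), Dom_get_potential_enclosed_tiles rows route → Spec_get_potential_enclosed_tiles rows route (get_potential_enclosed_tiles rows route)

-- ===== LEMMAS AND PROOFS =====

-- the character both programs put at cell (i, j)
def pvCell (rows : List String) (route : List (Int × Int)) (i j : Nat) : Char :=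
  if ((i : Int), (j : Int)) ∈ route then (rows.getD i "").toList.getD j '?' else '?'

lemma foldl_push {α β : Type} (f : α → β) :
    ∀ (l : List α) (acc : List β),
      l.foldl (fun a x => a ++ [f x]) acc = acc ++ l.map f := by
  intro l
  induction l with
  | nil => simp
  | cons x xs ih => intro acc; simp [List.foldl, ih]

lemma foldl_ite_push (P : Nat → Prop) [DecidablePred P] (f : Nat → Char) (c : Char) :
    ∀ (l : List Nat) (acc : List Char),
      l.foldl (fun a x => a ++ (if P x then [f x] else [c])) acc
        = acc ++ l.map (fun x => if P x then f x else c) := by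
  intro l
  induction l with
  | nil => simp
  | cons x xs ih =>
      intro acc
      simp only [List.foldl, List.map, ih]
      by_cases h : P x <;> simp [h]

lemma a_as_map (rows : List String) (route : List (Int × Int)) :
    get_potential_enclosed_tiles rows route
      = (List.range rows.length).map (fun i =>
          String.mk ((List.range (rows.getD i "").toList.length).map (pvCell rows route i))) := by
  unfold get_potential_enclosed_tiles
  rw [foldl_push (f := fun i =>
        String.mk ((List.range (rows.getD i "").toList.length).foldl (fun nr (j : Nat) =>
          nr ++ (if ((i : Int), (j : Int)) ∈ route then [(rows.getD i "").toList.getD j '?'] else ['?'])) []))]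
  simp only [List.nil_append]
  apply List.map_congr_left
  intro i _
  congr 1
  rw [foldl_ite_push (P := fun j => ((i : Int), (j : Int)) ∈ route)
        (f := fun j => (rows.getD i "").toList.getD j '?') (c := '?')]
  simp [pvCell]

lemma getD_set {α : Type} (l : List α) (k : Nat) (a d : α) (i : Nat) (hk : k < l.length) :
    (l.set k a).getD i d = if i = k then a else l.getD i d := by
  by_cases h : i = k
  · subst h
    simp [List.getD, List.getElem?_set, hk]
  · simp [List.getD, List.getElem?_set, h, Ne.symm h]

lemma scatter_foldl (rows : List String) :
    ∀ (route : List (Int × Int)) (cv : List (List Char)),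
      cv.length = rows.length →
      (∀ i, i < rows.length → (cv.getD i []).length = (rows.getD i "").toList.length) →
      (route.foldl (pvScatter rows) cv).length = rows.length ∧
      (∀ i, i < rows.length →
        ((route.foldl (pvScatter rows) cv).getD i []).length = (rows.getD i "").toList.length) ∧
      (∀ i j, i < rows.length → j < (rows.getD i "").toList.length →
        ((route.foldl (pvScatter rows) cv).getD i []).getD j '?' =
          if ((i : Int), (j : Int)) ∈ route then (rows.getD i "").toList.getD j '?'
          else (cv.getD i []).getD j '?') := by
  intro route
  induction route with
  | nil =>
      intro cv h1 h2
      exact ⟨h1, h2, by intro i j _ _; simp⟩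
  | cons p rest ih =>
      obtain ⟨pr, pc⟩ := p
      intro cv h1 h2
      rw [List.foldl_cons]
      by_cases hg : 0 ≤ pr ∧ pr < (rows.length : Int) ∧ 0 ≤ pc ∧
          pc < ((rows.getD pr.toNat "").toList.length : Int)
      · obtain ⟨hr0, hr1, hc0, hc1⟩ := hg
        have hkl : pr.toNat < rows.length := by omega
        have hml : pc.toNat < (rows.getD pr.toNat "").toList.length := by omega
        have hcv : pvScatter rows cv (pr, pc) =
            cv.set pr.toNat ((cv.getD pr.toNat []).set pc.toNat
              ((rows.getD pr.toNat "").toList.getD pc.toNat '?')) := by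
          unfold pvScatter
          exact if_pos ⟨hr0, hr1, hc0, hc1⟩
        have hkcv : pr.toNat < cv.length := by omega
        have hlen' : (pvScatter rows cv (pr, pc)).length = rows.length := by
          rw [hcv, List.length_set]; exact h1
        have hrow' : ∀ i, i < rows.length →
            ((pvScatter rows cv (pr, pc)).getD i []).length = (rows.getD i "").toList.length := by
          intro i hi
          rw [hcv, getD_set _ _ _ _ _ hkcv]
          by_cases hik : i = pr.toNat
          · rw [if_pos hik, List.length_set, hik]
            exact h2 _ hkl
          · rw [if_neg hik]; exact h2 i hi
        obtain ⟨j1, j2, j3⟩ := ih (pvScatter rows cv (pr, pc)) hlen' hrow'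
        refine ⟨j1, j2, ?_⟩
        intro i j hi hj
        rw [j3 i j hi hj]
        have hmlen : pc.toNat < (cv.getD pr.toNat []).length := by
          rw [h2 _ hkl]; exact hml
        have hcell : ((pvScatter rows cv (pr, pc)).getD i []).getD j '?' =
            if ((i : Int), (j : Int)) = ((pr, pc) : Int × Int) then (rows.getD i "").toList.getD j '?'
            else (cv.getD i []).getD j '?' := by
          rw [hcv, getD_set _ _ _ _ _ hkcv]
          by_cases hik : i = pr.toNat
          · subst hik
            rw [if_pos rfl, getD_set _ _ _ _ _ hmlen]
            by_cases hjm : j = pc.toNat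
            · subst hjm
              rw [if_pos rfl,
                if_pos (show (((pr.toNat : Nat) : Int), ((pc.toNat : Nat) : Int)) = ((pr, pc) : Int × Int) by
                  rw [Prod.mk.injEq]; constructor <;> omega)]
            · rw [if_neg hjm,
                if_neg (show ¬ (((pr.toNat : Nat) : Int), ((j : Nat) : Int)) = ((pr, pc) : Int × Int) from
                  fun hq => hjm (by
                    have := (Prod.mk.injEq _ _ _ _ ▸ hq).2
                    omega))]
          · rw [if_neg hik,
              if_neg (show ¬ (((i : Nat) : Int), ((j : Nat) : Int)) = ((pr, pc) : Int × Int) from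
                fun hq => hik (by
                  have := (Prod.mk.injEq _ _ _ _ ▸ hq).1
                  omega))]
        rw [hcell]
        rcases eq_or_ne (((i : Nat) : Int), ((j : Nat) : Int)) ((pr, pc) : Int × Int) with hp | hp
        · by_cases hmem : ((i : Int), (j : Int)) ∈ rest
          · rw [if_pos hmem, if_pos (List.mem_cons.2 (Or.inr hmem))]
          · rw [if_neg hmem, if_pos hp, if_pos (List.mem_cons.2 (Or.inl hp))]
        · by_cases hmem : ((i : Int), (j : Int)) ∈ rest
          · rw [if_pos hmem, if_pos (List.mem_cons.2 (Or.inr hmem))]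
          · rw [if_neg hmem, if_neg hp, if_neg (by
              intro hmc
              rcases List.mem_cons.1 hmc with h | h
              · exact hp h
              · exact hmem h)]
      · have hcv : pvScatter rows cv (pr, pc) = cv := by
          unfold pvScatter
          exact if_neg hg
        rw [hcv]
        obtain ⟨j1, j2, j3⟩ := ih cv h1 h2
        refine ⟨j1, j2, ?_⟩
        intro i j hi hj
        rw [j3 i j hi hj]
        have hp : ¬ (((i : Nat) : Int), ((j : Nat) : Int)) = ((pr, pc) : Int × Int) := by
          intro hq
          have hq1 := (Prod.mk.injEq _ _ _ _ ▸ hq).1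
          have hq2 := (Prod.mk.injEq _ _ _ _ ▸ hq).2
          apply hg
          refine ⟨by omega, by omega, by omega, ?_⟩
          have hki : pr.toNat = i := by omega
          rw [hki]
          omega
        by_cases hmem : ((i : Int), (j : Int)) ∈ rest
        · rw [if_pos hmem, if_pos (List.mem_cons.2 (Or.inr hmem))]
        · rw [if_neg hmem, if_neg (by
            intro hmc
            rcases List.mem_cons.1 hmc with h | h
            · exact hp h
            · exact hmem h)]

lemma b_as_map (rows : List String) (route : List (Int × Int)) :
    get_potential_enclosed_tiles_alt rows route
      = (List.range rows.length).map (fun i =>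
          String.mk ((List.range (rows.getD i "").toList.length).map (pvCell rows route i))) := by
  unfold get_potential_enclosed_tiles_alt
  set cv0 := rows.map (fun s => List.replicate s.toList.length '?') with hcv0
  have hget : ∀ i, i < rows.length →
      cv0.getD i [] = List.replicate (rows.getD i "").toList.length '?' := by
    intro i hi
    rw [hcv0, List.getD_eq_getElem _ _ (by simpa using hi), List.getElem_map,
      List.getD_eq_getElem _ _ hi]
  have hlen0 : cv0.length = rows.length := by simp [hcv0]
  have hrow0 : ∀ i, i < rows.length →
      (cv0.getD i []).length = (rows.getD i "").toList.length := by
    intro i hi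
    rw [hget i hi, List.length_replicate]
  obtain ⟨f1, f2, f3⟩ := scatter_foldl rows route cv0 hlen0 hrow0
  set cvf := route.foldl (pvScatter rows) cv0 with hcvf
  have hmain : cvf = (List.range rows.length).map (fun i =>
      (List.range (rows.getD i "").toList.length).map (pvCell rows route i)) := by
    apply List.ext_getElem
    · simp [f1]
    · intro i hi hi2
      have hir : i < rows.length := by rw [f1] at hi; exact hi
      have hrowlen : cvf[i].length = (rows.getD i "").toList.length := by
        have h := f2 i hir
        rwa [List.getD_eq_getElem _ _ hi] at h
      simp only [List.getElem_map, List.getElem_range]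
      apply List.ext_getElem
      · rw [hrowlen, List.length_map, List.length_range]
      · intro j hj hj2
        have hjr : j < (rows.getD i "").toList.length := by rwa [hrowlen] at hj
        have h3 := f3 i j hir hjr
        rw [List.getD_eq_getElem _ _ hi, List.getD_eq_getElem _ _ hj, hget i hir] at h3
        have hrep : (List.replicate ((rows.getD i "").toList.length) '?').getD j '?' = '?' := by
          rw [List.getD_eq_getElem _ _ (by simpa using hjr)]
          simp
        rw [hrep] at h3
        simp only [List.getElem_map, List.getElem_range]
        rw [h3, pvCell]
  rw [hmain, List.map_map]
  rfl

-- ===== VERDICT (by name: the statement is the Claim_ definition above) =====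
theorem get_potential_enclosed_tiles_spec : Claim_equal_get_potential_enclosed_tiles := by
  intro rows route _
  unfold Spec_get_potential_enclosed_tiles
  rw [a_as_map, b_as_map]
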